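-- pv_equiv track=rewrite | github.com/xbmc/repo-scripts | script.pulseequalizer.gui/resources/lib/basic/minixml.py | parse_attr
-- ===== SOURCE A (Python) =====
-- def parse_attr(val):
-- 	cols = val.split(' ')
-- 	tag=cols[0]
-- 	attr={}
--
-- 	ncols=[]
-- 	for col in cols[1:]:
-- 		if col=='': continue
-- 		ncols = ncols + col.split("=")
--
-- 	it = iter(ncols)
-- 	try:
-- 		while True:
-- 			col = next(it)
-- 			attr[col]= next(it)
-- 	except StopIteration: pass
-- 	return tag,attr
-- ===== SOURCE B (Python) =====
-- def parse_attr(val):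
-- 	tag, *rest = val.split(' ')
-- 	attr = {}
-- 	pending = None
-- 	for col in rest:
-- 		if col == '':
-- 			continue
-- 		for tok in col.split('='):
-- 			if pending is None:
-- 				pending = tok
-- 			else:
-- 				attr[pending] = tok
-- 				pending = None
-- 	return tag, attr
-- ===== Notes on version B (the rewrite author's own statement) =====
-- stated objective: simpler
-- what changed: B replaces A's flatten-then-pair (building an intermediate ncols list by repeated list concatenation and then pairing it with an iter/next/StopIteration loop) with a single pass over the columns that toggles a pending-key state across tokens, never materialising the flattened list.
import Mathlib
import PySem

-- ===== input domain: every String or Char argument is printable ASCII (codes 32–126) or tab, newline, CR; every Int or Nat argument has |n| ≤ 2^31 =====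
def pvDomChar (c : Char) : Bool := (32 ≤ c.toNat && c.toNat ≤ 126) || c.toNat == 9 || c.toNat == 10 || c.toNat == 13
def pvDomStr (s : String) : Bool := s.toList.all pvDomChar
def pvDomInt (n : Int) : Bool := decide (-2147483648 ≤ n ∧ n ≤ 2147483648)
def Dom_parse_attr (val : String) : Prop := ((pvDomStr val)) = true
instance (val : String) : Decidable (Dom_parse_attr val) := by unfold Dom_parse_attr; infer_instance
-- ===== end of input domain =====

-- B replaces A's flatten-then-pair with a single toggling pass over the tokens; return value only, no mutation.

-- ===== PORT A =====
-- the iter/next/next pairing loop: consumes two tokens at a time, a trailing odd token is dropped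
def pairsA : PySem.Dict String String → List String → PySem.Dict String String
  | attr, [] => attr
  | attr, [_] => attr
  | attr, k :: v :: rest => pairsA (attr.insert k v) rest

def parse_attr (val : String) : String × (List (String × String)) :=
  let cols := (PySem.Str.split? val " ").getD []
  -- cols[0]: splitOn with a nonempty separator never returns [], so the IndexError is unreachable
  let tag := (PySem.List.pyGet? cols 0).getD ""
  let ncols := (PySem.List.slice cols (some 1) none).foldl
      (fun acc col => if col == "" then acc else acc ++ (PySem.Str.split? col "=").getD []) []
  (tag, (pairsA PySem.Dict.empty ncols).items)

-- ===== PORT B =====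
-- one token step of B's state machine: state = (dict so far, pending key)
def stepB (st : PySem.Dict String String × Option String) (tok : String) :
    PySem.Dict String String × Option String :=
  match st.2 with
  | none => (st.1, some tok)
  | some k => (st.1.insert k tok, none)

def parse_attr_alt (val : String) : String × (List (String × String)) :=
  match (PySem.Str.split? val " ").getD [] with
  | [] => ("", [])  -- unreachable: splitOn never returns []
  | tag :: rest =>
    let st := rest.foldl
      (fun st col =>
        if col == "" then st
        else ((PySem.Str.split? col "=").getD []).foldl stepB st)
      (PySem.Dict.empty, none)
    (tag, st.1.items)

-- ===== PRECONDITION & SPEC =====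
def Spec_parse_attr (val : String) (out : String × (List (String × String))) : Prop := out = parse_attr_alt val
instance (val : String) (out : String × (List (String × String))) : Decidable (Spec_parse_attr val out) := by unfold Spec_parse_attr; infer_instance

-- ===== CLAIM (what is proved, stated in full; the proofs are below) =====
def Claim_equal_parse_attr : Prop := ∀ (val : String), Dom_parse_attr val → Spec_parse_attr val (parse_attr val)

-- ===== LEMMAS AND PROOFS =====

-- folding over a flatMap = nested folds
theorem foldl_flatMap' {α β γ : Type} (g : γ → β → γ) (f : α → List β) :
    ∀ (l : List α) (init : γ),
      (l.flatMap f).foldl g init = l.foldl (fun acc x => (f x).foldl g acc) init := by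
  intro l
  induction l with
  | nil => intro init; rfl
  | cons a t ih => intro init; simp [List.flatMap_cons, List.foldl_append, ih]

-- a fold skipping elements with p = the fold over the filtered list
theorem foldl_skip {α γ : Type} (p : α → Bool) (g : γ → α → γ) :
    ∀ (l : List α) (init : γ),
      l.foldl (fun st x => if p x then st else g st x) init
        = (l.filter (fun x => !p x)).foldl g init := by
  intro l
  induction l with
  | nil => intro init; rfl
  | cons a t ih =>
      intro init
      by_cases h : p a = true <;> simp [h, ih]

-- the toggle fold started with no pending key equals the pair-at-a-time recursion
theorem toggle_eq_pairs (d : PySem.Dict String String) (toks : List String) :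
    (toks.foldl stepB (d, none)).1 = pairsA d toks := by
  induction d, toks using pairsA.induct with
  | case1 d => rfl
  | case2 d x => rfl
  | case3 d k v rest ih => simpa [List.foldl_cons, stepB] using ih

theorem parse_attr_eq (val : String) : parse_attr val = parse_attr_alt val := by
  unfold parse_attr parse_attr_alt
  cases h : (PySem.Str.split? val " ").getD [] with
  | nil => rfl
  | cons tag rest =>
      dsimp only
      have hslice : PySem.List.slice (tag :: rest) (some 1) none = rest := by
        rw [PySem.List.slice_from (tag :: rest) (a := 1) (by omega)]; rfl
      have hget : (PySem.List.pyGet? (tag :: rest) 0).getD "" = tag := by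
        simp [PySem.List.pyGet?, PySem.List.pyIdx?]
      rw [hslice, hget]
      rw [foldl_skip (fun col => col == "") (fun acc col => acc ++ (PySem.Str.split? col "=").getD []) rest]
      rw [foldl_skip (fun col => col == "") (fun st col => ((PySem.Str.split? col "=").getD []).foldl stepB st) rest]
      rw [PySem.List.foldl_append_eq_flatMap]
      rw [← foldl_flatMap']
      rw [toggle_eq_pairs]
      simp

-- ===== VERDICT (by name: the statement is the Claim_ definition above) =====
theorem parse_attr_spec : Claim_equal_parse_attr := by
  intro val _
  unfold Spec_parse_attr
  exact parse_attr_eq val
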